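-- pv_equiv track=rewrite | github.com/FreaksMind/Python | lab2_sol.py | ex7
-- ===== SOURCE A (Python) =====
-- def ex7(list):
--     nrPalindroms = 0
--     longestIndex = 0
--     longestSize = -1
--     for i in range(len(list)):
--         if str(list[i]) == str(list[i])[::-1]:
--             if len(str(list[i])) > longestSize:
--                    longestSize = len(str(list[i]))
--                    longestIndex = i
--             nrPalindroms += 1
--
--
--     return (nrPalindroms, list[longestIndex])
-- ===== SOURCE B (Python) =====
-- def ex7(list):
--     pals = [x for x in list if str(x) == str(x)[::-1]]
--     if not pals:
--         return (0, list[0])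
--     ranked = sorted(pals, key=lambda x: len(str(x)), reverse=True)
--     return (len(pals), ranked[0])
-- ===== Notes on version B (the rewrite author's own statement) =====
-- stated objective: alternative
-- what changed: Replaces A's single-pass indexed running-max loop (tracking longestIndex/longestSize and re-indexing the list at the end) by staged passes: filter out the palindromic elements, then stable-sort them by descending str-length and take the sorted list's first element (stability reproduces A's strict-'>' first-maximum tie-break).
import Mathlib
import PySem

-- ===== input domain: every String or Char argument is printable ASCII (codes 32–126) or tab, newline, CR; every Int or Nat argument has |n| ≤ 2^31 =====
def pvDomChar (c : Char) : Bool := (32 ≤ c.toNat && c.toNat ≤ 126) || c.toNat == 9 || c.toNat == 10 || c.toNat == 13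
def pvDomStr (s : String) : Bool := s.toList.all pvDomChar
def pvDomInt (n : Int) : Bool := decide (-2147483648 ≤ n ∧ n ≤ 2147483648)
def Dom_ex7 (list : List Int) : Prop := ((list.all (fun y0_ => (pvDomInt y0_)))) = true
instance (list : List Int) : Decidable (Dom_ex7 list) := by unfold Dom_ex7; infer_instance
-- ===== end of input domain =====

-- B replaces A's indexed running-max loop by a filter of the palindromic elements plus a stable sort by descending string length, returning the sorted list's first element (objective: alternative).


-- ===== PORT A =====
-- loop body of A: state is (nrPalindroms, longestIndex, longestSize), i the current index;
-- like the Python, it recomputes str(list[i]) at each use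
def ex7Body (list : List Int) (st : Int × Int × Int) (i : Int) : Int × Int × Int :=
  if PySem.Str.slice? (PySem.Int.toStr (PySem.List.pyGetD list i 0)) none none (-1)
      = some (PySem.Int.toStr (PySem.List.pyGetD list i 0)) then
    if PySem.Str.len (PySem.Int.toStr (PySem.List.pyGetD list i 0)) > st.2.2 then
      (st.1 + 1, i, PySem.Str.len (PySem.Int.toStr (PySem.List.pyGetD list i 0)))
    else (st.1 + 1, st.2.1, st.2.2)
  else st

def ex7 (list : List Int) : Int × Int :=
  let st := (PySem.List.pyRange 0 (list.length : Int) 1).foldl (ex7Body list) (0, 0, -1)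
  (st.1, PySem.List.pyGetD list st.2.1 0)

-- ===== PORT B =====
-- str(x) == str(x)[::-1]
def isPalStr (x : Int) : Bool :=
  PySem.Str.slice? (PySem.Int.toStr x) none none (-1) = some (PySem.Int.toStr x)

-- len(str(x)), the sort key
def palKey (x : Int) : Int := PySem.Str.len (PySem.Int.toStr x)

def ex7_alt (list : List Int) : Int × Int :=
  let pals := list.filter isPalStr
  if pals = [] then ((0 : Int), PySem.List.pyGetD list 0 0)
  else
    let ranked := PySem.List.sorted pals palKey true
    ((pals.length : Int), PySem.List.pyGetD ranked 0 0)

-- ===== PRECONDITION & SPEC =====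
-- Pre_ excludes the empty list, on which the Python A (and B) raises IndexError when reading the first element.
def Pre_ex7 (list : List Int) : Prop := list ≠ []
instance (list : List Int) : Decidable (Pre_ex7 list) := by unfold Pre_ex7; infer_instance
def pvWitness_ex7 : List Int := ([1, -22, 121])
def Spec_ex7 (list : List Int) (out : Int × Int) : Prop := out = ex7_alt list
instance (list : List Int) (out : Int × Int) : Decidable (Spec_ex7 list out) := by unfold Spec_ex7; infer_instance

-- ===== CLAIM (what is proved, stated in full; the proofs are below) =====
def Claim_equal_ex7 : Prop := ∀ (list : List Int), Dom_ex7 list → Pre_ex7 list → Spec_ex7 list (ex7 list)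

-- ===== LEMMAS AND PROOFS =====

-- A's loop over the indices of l, as a function of l
def stA (l : List Int) : Int × Int × Int :=
  (PySem.List.pyRange 0 (l.length : Int) 1).foldl (ex7Body l) (0, 0, -1)

lemma pyGetD_append_left (l : List Int) (x : Int) (i : Int) (h0 : 0 ≤ i)
    (h : i < (l.length : Int)) : PySem.List.pyGetD (l ++ [x]) i 0 = PySem.List.pyGetD l i 0 := by
  rw [PySem.List.pyGetD_eq_getElem _ _ h0 (by simp; omega),
      PySem.List.pyGetD_eq_getElem _ _ h0 h]
  rw [List.getElem_append_left]

lemma pyGetD_append_last (l : List Int) (x : Int) :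
    PySem.List.pyGetD (l ++ [x]) (l.length : Int) 0 = x := by
  rw [PySem.List.pyGetD_eq_getElem _ _ (Int.natCast_nonneg _) (by simp)]
  simp

lemma ex7Body_append (l : List Int) (x : Int) (st : Int × Int × Int) (i : Int)
    (h0 : 0 ≤ i) (h : i < (l.length : Int)) :
    ex7Body (l ++ [x]) st i = ex7Body l st i := by
  unfold ex7Body
  rw [pyGetD_append_left l x i h0 h]

lemma stA_append (l : List Int) (x : Int) :
    stA (l ++ [x]) = ex7Body (l ++ [x]) (stA l) (l.length : Int) := by
  have hsplit : PySem.List.pyRange 0 (((l ++ [x]).length : Int)) 1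
      = PySem.List.pyRange 0 ((l.length : Int)) 1 ++ [(l.length : Int)] := by
    have hlen : ((l ++ [x]).length : Int) = (l.length : Int) + 1 := by simp
    rw [hlen]; exact PySem.List.pyRange_one_succ_right (Int.natCast_nonneg _)
  have hcongr : List.foldl (ex7Body (l ++ [x])) ((0 : Int), (0 : Int), (-1 : Int)) (PySem.List.pyRange 0 ((l.length : Int)) 1)
      = List.foldl (ex7Body l) ((0 : Int), (0 : Int), (-1 : Int)) (PySem.List.pyRange 0 ((l.length : Int)) 1) := by
    apply PySem.List.foldl_congr_mem
    intro st i hi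
    have hm := (PySem.List.mem_pyRange_one).1 hi
    exact ex7Body_append l x st i hm.1 hm.2
  unfold stA
  rw [hsplit]
  rw [List.foldl_append]
  rw [hcongr]
  simp only [List.foldl_cons, List.foldl_nil]

lemma max?_append_none (p : List Int) (x : Int)
    (h : PySem.List.max? p palKey = none) :
    PySem.List.max? (p ++ [x]) palKey = some x := by
  unfold PySem.List.max? at h ⊢
  rw [List.foldl_append, h]
  simp only [List.foldl_cons, List.foldl_nil]

lemma max?_append_some (p : List Int) (x m : Int)
    (h : PySem.List.max? p palKey = some m) :
    PySem.List.max? (p ++ [x]) palKey = if palKey m < palKey x then some x else some m := by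
  unfold PySem.List.max? at h ⊢
  rw [List.foldl_append, h]
  simp only [List.foldl_cons, List.foldl_nil]

lemma palKey_nonneg (x : Int) : 0 ≤ palKey x := by
  unfold palKey PySem.Str.len; positivity

-- head of a stable-descending insertion is exactly max?'s update step
lemma head?_insertBy (x : Int) (ys : List Int) :
    (PySem.List.insertBy (fun a b => decide (palKey b < palKey a)) x ys).head?
      = match ys.head? with
        | none => some x
        | some m => if palKey m < palKey x then some x else some m := by
  cases ys with
  | nil => rfl
  | cons m t =>
    simp only [PySem.List.insertBy, List.head?_cons]
    by_cases h : palKey m < palKey x <;> simp [h]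

lemma head?_foldl_insertBy (p : List Int) : ∀ (acc : List Int),
    (p.foldl (fun ac x => PySem.List.insertBy (fun a b => decide (palKey b < palKey a)) x ac) acc).head?
      = p.foldl (fun (o : Option Int) x =>
          match o with
          | none => some x
          | some m => if palKey m < palKey x then some x else some m) acc.head? := by
  induction p with
  | nil => intro acc; rfl
  | cons y ys ih =>
    intro acc
    simp only [List.foldl_cons]
    rw [ih, head?_insertBy]

-- max? is the head of the reverse-sorted list (stable sort keeps the first maximum first)
lemma max?_eq_head_sorted_rev (p : List Int) :
    PySem.List.max? p palKey = (PySem.List.sorted p palKey true).head? := by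
  rw [PySem.List.sorted_rev_eq_foldl_insertBy, head?_foldl_insertBy p []]
  simp only [List.head?_nil]
  unfold PySem.List.max?
  apply PySem.List.foldl_congr_mem
  intro o x _
  cases o <;> rfl

-- the invariant that relates A's loop state to the filtered list and its first maximum
def InvA (l : List Int) : Prop :=
  (stA l).1 = ((l.filter isPalStr).length : Int) ∧
  match PySem.List.max? (l.filter isPalStr) palKey with
  | none => (stA l).2.1 = 0 ∧ (stA l).2.2 = -1
  | some m => 0 ≤ (stA l).2.1 ∧ (stA l).2.1 < (l.length : Int) ∧
      PySem.List.pyGetD l (stA l).2.1 0 = m ∧ (stA l).2.2 = palKey m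

lemma inv_all (l : List Int) : InvA l := by
  induction l using List.reverseRecOn with
  | nil => unfold InvA stA; simp [PySem.List.max?]
  | append_singleton l x ih =>
    unfold InvA
    rw [stA_append]
    unfold ex7Body
    rw [pyGetD_append_last]
    obtain ⟨ih1, ih2⟩ := ih
    by_cases hp : isPalStr x = true
    · -- x is a palindrome: the filter gains x, A enters the outer branch
      have hpal : PySem.Str.slice? (PySem.Int.toStr x) none none (-1) = some (PySem.Int.toStr x) := by
        simpa [isPalStr] using hp
      have hfil : (l ++ [x]).filter isPalStr = l.filter isPalStr ++ [x] := by
        simp [List.filter_append, hp]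
      rw [hfil, if_pos hpal]
      rcases hmax : PySem.List.max? (l.filter isPalStr) palKey with _ | m
      · rw [hmax] at ih2
        obtain ⟨h2, h3⟩ := ih2
        rw [max?_append_none _ _ hmax]
        have hcond : PySem.Str.len (PySem.Int.toStr x) > (stA l).2.2 := by
          rw [h3]; have := palKey_nonneg x; exact lt_of_lt_of_le (by norm_num) this
        rw [if_pos hcond]
        refine ⟨by simp [ih1], Int.natCast_nonneg _, by simp, pyGetD_append_last l x, rfl⟩
      · rw [hmax] at ih2
        obtain ⟨hle, hlt, hget, hks⟩ := ih2
        rw [max?_append_some _ _ _ hmax]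
        by_cases hgt : palKey m < palKey x
        · have hcond : PySem.Str.len (PySem.Int.toStr x) > (stA l).2.2 := by
            rw [hks]; exact hgt
          rw [if_pos hcond, if_pos hgt]
          refine ⟨by simp [ih1], Int.natCast_nonneg _, by simp, pyGetD_append_last l x, rfl⟩
        · have hcond : ¬ PySem.Str.len (PySem.Int.toStr x) > (stA l).2.2 := by
            rw [hks]; exact hgt
          rw [if_neg hcond, if_neg hgt]
          refine ⟨by simp [ih1], hle, by simp only [List.length_append, List.length_cons, List.length_nil]; push_cast; omega, ?_, hks⟩
          rw [pyGetD_append_left l x _ hle hlt]; exact hget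
    · -- x is not a palindrome: filter and maximum unchanged, A skips the element
      have hpal : ¬ PySem.Str.slice? (PySem.Int.toStr x) none none (-1) = some (PySem.Int.toStr x) := by
        simpa [isPalStr] using hp
      have hfil : (l ++ [x]).filter isPalStr = l.filter isPalStr := by
        simp [List.filter_append, hp]
      rw [hfil, if_neg hpal]
      refine ⟨ih1, ?_⟩
      rcases hmax : PySem.List.max? (l.filter isPalStr) palKey with _ | m <;> rw [hmax] at ih2
      · exact ih2
      · obtain ⟨hle, hlt, hget, hks⟩ := ih2
        refine ⟨hle, by simp only [List.length_append, List.length_cons, List.length_nil]; push_cast; omega, ?_, hks⟩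
        rw [pyGetD_append_left l x _ hle hlt]; exact hget

lemma ex7_eq (list : List Int) :
    ex7 list = ((stA list).1, PySem.List.pyGetD list (stA list).2.1 0) := rfl

-- ===== VERDICT (by name: the statement is the Claim_ definition above) =====
theorem ex7_spec : Claim_equal_ex7 := by
  intro list _ _
  unfold Spec_ex7 ex7_alt
  rw [ex7_eq]
  obtain ⟨h1, h2⟩ := inv_all list
  by_cases hfil : list.filter isPalStr = []
  · rw [if_pos hfil]
    have hmax : PySem.List.max? (list.filter isPalStr) palKey = none := by
      rw [hfil]; rfl
    rw [hmax] at h2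
    obtain ⟨hi, _⟩ := h2
    rw [h1, hi, hfil]
    rfl
  · rw [if_neg hfil]
    have hne : PySem.List.sorted (list.filter isPalStr) palKey true ≠ [] := by
      intro h
      exact hfil ((PySem.List.sorted_eq_nil_iff _ _ _).1 h)
    obtain ⟨m, t, hmt⟩ := List.exists_cons_of_ne_nil hne
    have hmax : PySem.List.max? (list.filter isPalStr) palKey = some m := by
      rw [max?_eq_head_sorted_rev, hmt]; rfl
    rw [hmax] at h2
    obtain ⟨_, _, hget, _⟩ := h2
    rw [h1, hget, hmt]
    have hhd : PySem.List.pyGetD (m :: t) 0 0 = m := by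
      rw [show ((0 : Int)) = ((0 : Nat) : Int) from rfl, PySem.List.pyGetD_natCast]
      rfl
    exact congrArg (fun z => (((list.filter isPalStr).length : Int), z)) hhd.symm
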